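-- pv_equiv track=rewrite | github.com/mhxie/reflectl | scripts/trust.py | _split_marker_line
-- ===== SOURCE A (Python) =====
-- def _split_marker_line(line: str) -> tuple[str, str, list[str]] | None:
--     """Split `@kind: first | k: v | k: v` into (kind, first_value, extras).
--
--     Returns None if the line is blank, a comment, or does not begin with a
--     recognized marker prefix.
--     """
--     stripped = line.strip()
--     if not stripped or stripped.startswith("#"):
--         return None
--     for kind in ("@anchor", "@cite", "@pass"):
--         prefix = kind + ":"
--         if stripped.startswith(prefix):
--             rest = stripped[len(prefix):]
--             parts = [p.strip() for p in rest.split(" | ")]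
--             if not parts:
--                 return None
--             return kind, parts[0], parts[1:]
--     return None
-- ===== SOURCE B (Python) =====
-- def _split_marker_line(line: str) -> tuple[str, str, list[str]] | None:
--     # Pass order reversed w.r.t. the original: split the WHOLE stripped line into
--     # " | "-separated fields first (the marker prefix contains no space, so field
--     # boundaries are unaffected), then dissect only the first field at its colon.
--     stripped = line.strip()
--     if not stripped or stripped.startswith("#"):
--         return None
--     tokens = stripped.split(" | ")
--     head, sep, first = tokens[0].partition(":")
--     if not sep or head not in ("@anchor", "@cite", "@pass"):
--         return None
--     return head, first.strip(), [t.strip() for t in tokens[1:]]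
-- ===== Notes on version B (the rewrite author's own statement) =====
-- stated objective: alternative
-- what changed: Reverses the pass order: instead of trying each of the three marker prefixes with startswith and then splitting the remainder on ' | ', B first splits the WHOLE stripped line into ' | ' fields and only then dissects the first field at its first colon (correct because marker prefixes contain no space, so field boundaries are unaffected).
import Mathlib
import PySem

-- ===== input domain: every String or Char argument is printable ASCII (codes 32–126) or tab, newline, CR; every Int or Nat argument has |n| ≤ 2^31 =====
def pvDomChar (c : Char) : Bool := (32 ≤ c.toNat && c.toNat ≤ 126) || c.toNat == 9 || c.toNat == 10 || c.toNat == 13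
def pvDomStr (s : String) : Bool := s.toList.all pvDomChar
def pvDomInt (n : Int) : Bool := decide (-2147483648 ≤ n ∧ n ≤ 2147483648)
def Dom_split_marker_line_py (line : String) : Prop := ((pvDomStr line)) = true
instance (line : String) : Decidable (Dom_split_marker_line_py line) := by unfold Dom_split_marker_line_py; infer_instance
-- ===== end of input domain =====

-- B reverses the pass order: it splits the WHOLE stripped line into " | " fields first
-- (the marker prefix contains no space, so field boundaries are unaffected), then dissects
-- only the first field at its colon (objective: alternative; same cost).

-- ===== PORT A =====
-- the `for kind in (...)` loop: structural recursion over the tuple of kinds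
def split_marker_line_pyLoop (stripped : List Char) : List String → Option (String × String × List String)
  | [] => none
  | kind :: ks =>
    let pfx := kind.toList ++ [':']
    if PySem.Chars.startswith stripped pfx then
      let rest := PySem.Chars.slice stripped (some (pfx.length : Int)) none
      let parts := (PySem.Chars.splitOn rest " | ".toList).map
        (fun p => String.ofList (PySem.Chars.strip p))
      match parts with
      | [] => none              -- `if not parts: return None` (split never returns [], dead)
      | p :: ps => some (kind, p, ps)
    else split_marker_line_pyLoop stripped ks

def split_marker_line_py (line : String) : Option (String × String × List String) :=
  let stripped := PySem.Chars.strip line.toList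
  if stripped = [] ∨ PySem.Chars.startswith stripped "#".toList = true then none
  else split_marker_line_pyLoop stripped ["@anchor", "@cite", "@pass"]

-- ===== PORT B =====
-- the body after the blank/comment guard: split the whole line on " | ", dissect field 0
def split_marker_line_py_altBody (stripped : List Char) : Option (String × String × List String) :=
  -- tokens = stripped.split(" | ");  head, sep, first = tokens[0].partition(":")
  let tokens := PySem.Chars.splitOn stripped " | ".toList
  let f := tokens.headD []          -- tokens[0]; split never returns [], so the default is dead
  let head := f.takeWhile (· ≠ ':')
  let rest := f.dropWhile (· ≠ ':') -- ':' followed by the partition's third component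
  if rest = [] then none            -- `if not sep`: no ':' in the first field
  else if head = "@anchor".toList ∨ head = "@cite".toList ∨ head = "@pass".toList then
    some (String.ofList head, String.ofList (PySem.Chars.strip rest.tail),
          tokens.tail.map (fun t => String.ofList (PySem.Chars.strip t)))
  else none

def split_marker_line_py_alt (line : String) : Option (String × String × List String) :=
  let stripped := PySem.Chars.strip line.toList
  if stripped = [] ∨ PySem.Chars.startswith stripped "#".toList = true then none
  else split_marker_line_py_altBody stripped

-- ===== PRECONDITION & SPEC =====
def Spec_split_marker_line_py (line : String) (out : Option (String × String × List String)) : Prop := out = split_marker_line_py_alt line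
instance (line : String) (out : Option (String × String × List String)) : Decidable (Spec_split_marker_line_py line out) := by unfold Spec_split_marker_line_py; infer_instance

-- ===== CLAIM (what is proved, stated in full; the proofs are below) =====
def Claim_equal_split_marker_line_py : Prop := ∀ (line : String), Dom_split_marker_line_py line → Spec_split_marker_line_py line (split_marker_line_py line)

-- ===== LEMMAS AND PROOFS =====

-- equation lemmas for the fuel-based PySem.Chars.splitOn.go
theorem pv_go_zero (sep : List Char) (l cur : List Char) (acc : List (List Char)) :
    PySem.Chars.splitOn.go sep 0 l cur acc = ((cur.reverse ++ l) :: acc).reverse := by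
  rw [PySem.Chars.splitOn.go]

theorem pv_go_nil (sep : List Char) (fuel : Nat) (cur : List Char) (acc : List (List Char)) :
    PySem.Chars.splitOn.go sep (fuel+1) [] cur acc = (cur.reverse :: acc).reverse := by
  rw [PySem.Chars.splitOn.go]; simp

theorem pv_go_cons (sep : List Char) (fuel : Nat) (c : Char) (rest cur : List Char) (acc : List (List Char)) :
    PySem.Chars.splitOn.go sep (fuel+1) (c::rest) cur acc =
      (if sep.isPrefixOf (c::rest)
       then PySem.Chars.splitOn.go sep fuel (List.drop sep.length (c::rest)) [] (cur.reverse :: acc)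
       else PySem.Chars.splitOn.go sep fuel rest (c::cur) acc) := by
  rw [PySem.Chars.splitOn.go]

-- the accumulators factor out of go
theorem pv_go_shape (sep : List Char) (fuel : Nat) :
    ∀ (l cur : List Char) (acc : List (List Char)),
      PySem.Chars.splitOn.go sep fuel l cur acc =
        acc.reverse ++ (PySem.Chars.splitOn.go sep fuel l [] []).modifyHead (cur.reverse ++ ·) := by
  induction fuel with
  | zero => intro l cur acc; simp [pv_go_zero]
  | succ fuel ih =>
    intro l cur acc
    cases l with
    | nil => simp [pv_go_nil]
    | cons c rest =>
      rw [pv_go_cons, pv_go_cons]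
      split_ifs with h
      · simp only [List.reverse_nil]
        rw [ih (List.drop sep.length (c::rest)) [] (cur.reverse :: acc),
            ih (List.drop sep.length (c::rest)) [] ([[]])]
        simp
      · rw [ih rest (c::cur) acc, ih rest (c :: []) []]
        cases PySem.Chars.splitOn.go sep fuel rest [] [] <;> simp

theorem pv_go_ne_nil (sep : List Char) (fuel : Nat) (l : List Char) :
    PySem.Chars.splitOn.go sep fuel l [] [] ≠ [] := by
  induction fuel generalizing l with
  | zero => simp [pv_go_zero]
  | succ fuel ih =>
    cases l with
    | nil => simp [pv_go_nil]
    | cons c rest =>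
      rw [pv_go_cons]
      split_ifs with h
      · rw [pv_go_shape]
        simp
      · rw [pv_go_shape]
        cases hg : PySem.Chars.splitOn.go sep fuel rest [] [] with
        | nil => exact absurd hg (ih rest)
        | cons a b => simp

-- the first piece of a split is a prefix of the string
theorem pv_go_head_prefix (sep : List Char) (fuel : Nat) :
    ∀ (l h : List Char) (t : List (List Char)),
      PySem.Chars.splitOn.go sep fuel l [] [] = h :: t → h <+: l := by
  induction fuel with
  | zero => intro l h t hg; rw [pv_go_zero] at hg; simp at hg; simp [hg.1]
  | succ fuel ih =>
    intro l h t hg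
    cases l with
    | nil =>
      rw [pv_go_nil] at hg; simp at hg; simp [hg.1]
    | cons c rest =>
      rw [pv_go_cons] at hg
      split_ifs at hg with hp
      · rw [pv_go_shape] at hg
        simp at hg
        simp [hg.1]
      · rw [pv_go_shape] at hg
        cases hg' : PySem.Chars.splitOn.go sep fuel rest [] [] with
        | nil => exact absurd hg' (pv_go_ne_nil sep fuel rest)
        | cons a b =>
          rw [hg'] at hg
          simp at hg
          obtain ⟨rfl, -⟩ := hg
          exact (List.prefix_cons_inj c).mpr (ih rest a b hg')

-- go skips over a separator-free prefix, accumulating it into cur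
theorem pv_go_skip (s0 : Char) (ss : List Char) :
    ∀ (pfx : List Char), (∀ c ∈ pfx, c ≠ s0) →
      ∀ (fuel : Nat) (rest cur : List Char) (acc : List (List Char)),
        PySem.Chars.splitOn.go (s0::ss) (fuel + pfx.length) (pfx ++ rest) cur acc =
          PySem.Chars.splitOn.go (s0::ss) fuel rest (pfx.reverse ++ cur) acc := by
  intro pfx
  induction pfx with
  | nil => intro _ fuel rest cur acc; simp
  | cons c pfx' ih =>
    intro h fuel rest cur acc
    have hc : c ≠ s0 := h c (by simp)
    have hlen : fuel + (c :: pfx').length = (fuel + pfx'.length) + 1 := by simp; omega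
    rw [hlen, List.cons_append, pv_go_cons]
    have hnp : (s0::ss).isPrefixOf (c :: (pfx' ++ rest)) = false := by
      simp [List.isPrefixOf]
      intro hs; exact absurd hs.symm hc
    rw [hnp]
    simp only [Bool.false_eq_true, if_false]
    rw [ih (fun d hd => h d (by simp [hd])) fuel rest (c::cur) acc]
    simp

-- splitting pfx ++ rest, when pfx avoids the separator's first character,
-- is splitting rest with pfx glued onto the first piece
theorem pv_splitOn_append (pfx rest : List Char) (s0 : Char) (ss : List Char)
    (h : ∀ c ∈ pfx, c ≠ s0) :
    PySem.Chars.splitOn (pfx ++ rest) (s0::ss) =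
      (PySem.Chars.splitOn rest (s0::ss)).modifyHead (pfx ++ ·) := by
  unfold PySem.Chars.splitOn
  have hlen : (pfx ++ rest).length + 1 = (rest.length + 1) + pfx.length := by simp; omega
  rw [hlen, pv_go_skip s0 ss pfx h (rest.length + 1) rest [] []]
  rw [pv_go_shape]
  simp

theorem pv_splitOn_ne_nil (l sep : List Char) : PySem.Chars.splitOn l sep ≠ [] := by
  unfold PySem.Chars.splitOn; exact pv_go_ne_nil sep (l.length + 1) l

theorem pv_splitOn_head_prefix (l sep h : List Char) (t : List (List Char))
    (hg : PySem.Chars.splitOn l sep = h :: t) : h <+: l := by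
  unfold PySem.Chars.splitOn at hg
  exact pv_go_head_prefix sep (l.length + 1) l h t hg

-- partition helpers (first occurrence of ':')
theorem pv_takeWhile_prefix (k r : List Char) (hk : ∀ c ∈ k, c ≠ ':') :
    (k ++ ':' :: r).takeWhile (· ≠ ':') = k := by
  simp [List.takeWhile_append]; intro _; exact hk

theorem pv_dropWhile_prefix (k r : List Char) (hk : ∀ c ∈ k, c ≠ ':') :
    (k ++ ':' :: r).dropWhile (· ≠ ':') = ':' :: r := by
  have h1 := List.takeWhile_append_dropWhile (p := (· ≠ ':')) (l := k ++ ':' :: r)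
  rw [pv_takeWhile_prefix k r hk] at h1
  exact List.append_cancel_left (by rw [h1])

theorem pv_decomp (t : List Char) (c : Char) (rest : List Char)
    (hd : t.dropWhile (· ≠ ':') = c :: rest) :
    t = t.takeWhile (· ≠ ':') ++ ':' :: rest := by
  have h1 := List.takeWhile_append_dropWhile (p := (· ≠ ':')) (l := t)
  have h2 := List.head?_dropWhile_not (· ≠ ':') t
  have hc : c = ':' := by rw [hd] at h2; simpa using h2
  rw [hd, hc] at h1
  exact h1.symm

-- A's slice after a matched prefix
theorem pv_slice_rest (t k rest : List Char) (ht : t = k ++ ':' :: rest) :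
    PySem.Chars.slice t (some (((k ++ [':']).length : Nat) : Int)) none = rest := by
  have h1 : t = (k ++ [':']) ++ rest := by rw [ht]; simp
  rw [PySem.Chars.slice_eq_listSlice, PySem.List.slice_from_natCast, h1]
  exact List.drop_left

-- one matched marker: A's branch value equals B's dissection of the first field
theorem pv_case (t : List Char) (kind : String) (s : List Char)
    (hk : kind = "@anchor" ∨ kind = "@cite" ∨ kind = "@pass")
    (ht : t = kind.toList ++ ':' :: s) :
    (match (PySem.Chars.splitOn
        (PySem.Chars.slice t (some (((kind.toList ++ [':']).length : Nat) : Int)) none)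
        " | ".toList).map (fun p => String.ofList (PySem.Chars.strip p)) with
      | [] => none
      | p :: ps => some (kind, p, ps)) = split_marker_line_py_altBody t := by
  have hkl : kind.toList = ['@','a','n','c','h','o','r'] ∨ kind.toList = ['@','c','i','t','e'] ∨
      kind.toList = ['@','p','a','s','s'] := by
    rcases hk with rfl | rfl | rfl
    · exact Or.inl rfl
    · exact Or.inr (Or.inl rfl)
    · exact Or.inr (Or.inr rfl)
  have hkc : ∀ c ∈ kind.toList, c ≠ ':' := by
    rcases hkl with h | h | h <;> rw [h] <;> simp
  have hks : ∀ c ∈ kind.toList ++ [':'], c ≠ ' ' := by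
    rcases hkl with h | h | h <;> rw [h] <;> simp
  have hsl := pv_slice_rest t kind.toList s ht
  rw [hsl]
  have ht2 : t = (kind.toList ++ [':']) ++ s := by rw [ht]; simp
  rcases hr : PySem.Chars.splitOn s " | ".toList with _ | ⟨r0, rs⟩
  · exact absurd hr (pv_splitOn_ne_nil s _)
  · have hsp : PySem.Chars.splitOn t " | ".toList = (kind.toList ++ ':' :: r0) :: rs := by
      have h := pv_splitOn_append (kind.toList ++ [':']) s ' ' "| ".toList hks
      rw [show (' ' :: "| ".toList) = " | ".toList from rfl, hr] at h
      rw [ht2, h]; simp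
    have hmem : kind.toList = "@anchor".toList ∨ kind.toList = "@cite".toList ∨
        kind.toList = "@pass".toList := by rcases hk with rfl | rfl | rfl <;> simp
    have hofl : String.ofList kind.toList = kind := by
      rcases hk with rfl | rfl | rfl <;> rfl
    unfold split_marker_line_py_altBody
    rw [hsp]
    simp only [List.headD_cons, List.tail_cons,
      pv_takeWhile_prefix kind.toList r0 hkc, pv_dropWhile_prefix kind.toList r0 hkc]
    rw [if_neg (by simp), if_pos hmem]
    simp [hofl]

-- no marker prefix matches: B's dissection also yields none
theorem pv_nocase (t : List Char)
    (h1 : ¬ PySem.Chars.startswith t ("@anchor".toList ++ [':']) = true)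
    (h2 : ¬ PySem.Chars.startswith t ("@cite".toList ++ [':']) = true)
    (h3 : ¬ PySem.Chars.startswith t ("@pass".toList ++ [':']) = true) :
    split_marker_line_py_altBody t = none := by
  unfold split_marker_line_py_altBody
  rcases hsp : PySem.Chars.splitOn t " | ".toList with _ | ⟨f, ts⟩
  · exact absurd hsp (pv_splitOn_ne_nil t _)
  · have hpf : f <+: t := pv_splitOn_head_prefix t _ f ts hsp
    simp only [List.headD_cons, List.tail_cons]
    rcases hd : f.dropWhile (· ≠ ':') with _ | ⟨c, first⟩
    · rw [if_pos rfl]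
    · have hdec := pv_decomp f c first hd
      rw [if_neg (by simp), if_neg]
      have key : ∀ (k : List Char), f = k ++ ':' :: first → (k ++ [':']) <+: t :=
        fun k hkk => List.IsPrefix.trans ⟨first, by rw [hkk]; simp⟩ hpf
      rintro (hh | hh | hh)
      · rw [hh] at hdec
        exact h1 ((PySem.Chars.startswith_iff t _).mpr (key _ hdec))
      · rw [hh] at hdec
        exact h2 ((PySem.Chars.startswith_iff t _).mpr (key _ hdec))
      · rw [hh] at hdec
        exact h3 ((PySem.Chars.startswith_iff t _).mpr (key _ hdec))

-- the loop over the three prefixes equals B's split-first dissection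
theorem pv_main (t : List Char) :
    split_marker_line_pyLoop t ["@anchor", "@cite", "@pass"] =
      split_marker_line_py_altBody t := by
  by_cases h1 : PySem.Chars.startswith t ("@anchor".toList ++ [':']) = true
  · obtain ⟨s, hs⟩ := (PySem.Chars.startswith_iff t _).mp h1
    simp only [split_marker_line_pyLoop]
    rw [if_pos h1]
    exact pv_case t "@anchor" s (Or.inl rfl) (by rw [← hs]; simp)
  · by_cases h2 : PySem.Chars.startswith t ("@cite".toList ++ [':']) = true
    · obtain ⟨s, hs⟩ := (PySem.Chars.startswith_iff t _).mp h2
      simp only [split_marker_line_pyLoop]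
      rw [if_neg h1, if_pos h2]
      exact pv_case t "@cite" s (Or.inr (Or.inl rfl)) (by rw [← hs]; simp)
    · by_cases h3 : PySem.Chars.startswith t ("@pass".toList ++ [':']) = true
      · obtain ⟨s, hs⟩ := (PySem.Chars.startswith_iff t _).mp h3
        simp only [split_marker_line_pyLoop]
        rw [if_neg h1, if_neg h2, if_pos h3]
        exact pv_case t "@pass" s (Or.inr (Or.inr rfl)) (by rw [← hs]; simp)
      · simp only [split_marker_line_pyLoop]
        rw [if_neg h1, if_neg h2, if_neg h3]
        exact (pv_nocase t h1 h2 h3).symm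

-- ===== VERDICT (by name: the statement is the Claim_ definition above) =====
theorem split_marker_line_py_spec : Claim_equal_split_marker_line_py := by
  intro line _
  show split_marker_line_py line = split_marker_line_py_alt line
  unfold split_marker_line_py split_marker_line_py_alt
  by_cases hguard : PySem.Chars.strip line.toList = [] ∨
      PySem.Chars.startswith (PySem.Chars.strip line.toList) "#".toList = true
  · rw [if_pos hguard, if_pos hguard]
  · rw [if_neg hguard, if_neg hguard]
    exact pv_main (PySem.Chars.strip line.toList)
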